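-- pv_equiv track=rewrite | github.com/megascienta/sciona | code_analysis/analysis/graph/module_id.py | module_id_for
-- ===== SOURCE A (Python) =====
-- from typing import Set
--
-- def module_id_for(qualified_name: str, module_names: Set[str]) -> str:
--     if not qualified_name:
--         return ""
--     if qualified_name in module_names:
--         return qualified_name
--     parts = qualified_name.split(".")
--     for end in range(len(parts) - 1, 0, -1):
--         candidate = ".".join(parts[:end])
--         if candidate in module_names:
--             return candidate
--     return parts[0]
-- ===== SOURCE B (Python) =====
-- def module_id_for(qualified_name: str, module_names) -> str:
--     # Scan the module set directly, keeping the longest dotted-prefix match,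
--     # instead of generating each dotted prefix and probing the set.
--     if not qualified_name:
--         return ""
--     best = None
--     for m in module_names:
--         if (m == qualified_name or qualified_name.startswith(m + ".")) and (
--             best is None or len(m) > len(best)
--         ):
--             best = m
--     if best is not None:
--         return best
--     return qualified_name.split(".")[0]
-- ===== Notes on version B (the rewrite author's own statement) =====
-- stated objective: alternative
-- what changed: B iterates over the module set itself, tracking the longest member that is a dotted prefix of qualified_name, instead of generating each dotted prefix of qualified_name (join of split parts) and probing the set from longest to shortest.
import Mathlib
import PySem

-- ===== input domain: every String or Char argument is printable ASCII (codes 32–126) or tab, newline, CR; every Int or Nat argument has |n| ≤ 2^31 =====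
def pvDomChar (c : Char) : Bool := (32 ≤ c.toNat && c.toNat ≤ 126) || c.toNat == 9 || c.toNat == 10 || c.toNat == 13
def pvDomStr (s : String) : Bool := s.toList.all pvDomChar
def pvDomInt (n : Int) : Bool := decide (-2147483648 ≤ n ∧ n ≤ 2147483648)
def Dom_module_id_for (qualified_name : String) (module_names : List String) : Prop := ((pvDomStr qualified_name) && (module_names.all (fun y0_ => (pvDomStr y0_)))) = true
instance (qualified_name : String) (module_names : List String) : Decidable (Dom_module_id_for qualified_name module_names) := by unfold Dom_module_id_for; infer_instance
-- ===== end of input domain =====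

-- B scans the module set for the longest dotted-prefix member instead of probing the set
-- with each dotted prefix of qualified_name (alternative traversal, same cost class).

-- ===== PORT A =====
-- the 'for end in range(len(parts)-1, 0, -1)' loop with its early return
def aPrefixLoop (module_names : List String) (parts : List String) : List Int → Option String
  | [] => none
  | e :: rest =>
      -- candidate = ".".join(parts[:end])
      let candidate := PySem.Str.join "." (PySem.List.slice parts none (some e))
      if module_names.contains candidate then some candidate
      else aPrefixLoop module_names parts rest

def module_id_for (qualified_name : String) (module_names : List String) : String :=
  if qualified_name == "" then ""
  else if module_names.contains qualified_name then qualified_name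
  else
    -- parts = qualified_name.split("."); separator "." is non-empty so split? never raises
    let parts := (PySem.Str.split? qualified_name ".").getD []
    match aPrefixLoop module_names parts
        (PySem.List.pyRange ((parts.length : Int) - 1) 0 (-1)) with
    | some candidate => candidate
    | none => (PySem.List.pyGet? parts 0).getD ""  -- parts[0]; split is never empty, IndexError unreachable

-- ===== PORT B =====
-- the 'for m in module_names' loop keeping the longest dotted-prefix match
-- (m + "." is ported at the char-list level: Str.startswith is Chars.startswith on .toList; exact)
def bBestLoop (qualified_name : String) : List String → Option String → Option String
  | [], best => best
  | m :: rest, best =>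
      if (m == qualified_name
            || PySem.Chars.startswith qualified_name.toList (m.toList ++ ['.']))
          && (match best with
              | none => true
              | some b => PySem.Str.len m > PySem.Str.len b) then
        bBestLoop qualified_name rest (some m)
      else
        bBestLoop qualified_name rest best

def module_id_for_alt (qualified_name : String) (module_names : List String) : String :=
  if qualified_name == "" then ""
  else
    match bBestLoop qualified_name module_names none with
    | some best => best
    | none =>
        (PySem.List.pyGet? ((PySem.Str.split? qualified_name ".").getD []) 0).getD ""

-- ===== PRECONDITION & SPEC =====
def Spec_module_id_for (qualified_name : String) (module_names : List String) (out : String) : Prop := out = module_id_for_alt qualified_name module_names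
instance (qualified_name : String) (module_names : List String) (out : String) : Decidable (Spec_module_id_for qualified_name module_names out) := by unfold Spec_module_id_for; infer_instance

-- ===== CLAIM (what is proved, stated in full; the proofs are below) =====
def Claim_equal_module_id_for : Prop := ∀ (qualified_name : String) (module_names : List String), Dom_module_id_for qualified_name module_names → Spec_module_id_for qualified_name module_names (module_id_for qualified_name module_names)

-- ===== LEMMAS AND PROOFS =====

-- reference splitter: what Chars.splitOn does for the one-character separator '.'
def mySplit : List Char → List Char → List (List Char)
  | [], cur => [cur.reverse]
  | c :: rest, cur => if c = '.' then cur.reverse :: mySplit rest [] else mySplit rest (c :: cur)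

lemma go_eq : ∀ (fuel : Nat) (l cur : List Char) (acc : List (List Char)), l.length < fuel →
    PySem.Chars.splitOn.go ['.'] fuel l cur acc = acc.reverse ++ mySplit l cur := by
  intro fuel
  induction fuel with
  | zero => intro l cur acc h; omega
  | succ n ih =>
    intro l cur acc h
    cases l with
    | nil =>
      rw [PySem.Chars.splitOn.go]
      · simp [mySplit]
      · omega
    | cons c rest =>
      rw [PySem.Chars.splitOn.go]
      by_cases hc : c = '.'
      · subst hc
        simp only [List.isPrefixOf, decide_true, Bool.and_true, beq_self_eq_true,
          List.isPrefixOf_nil_left, if_pos]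
        rw [ih _ _ _ (by simpa using Nat.lt_of_succ_lt_succ h)]
        simp [mySplit]
      · have : List.isPrefixOf ['.'] (c :: rest) = false := by
          simp [List.isPrefixOf]; exact fun h' => hc h'.symm
        rw [this]
        simp only [Bool.false_eq_true, if_neg, reduceCtorEq, not_false_eq_true]
        rw [ih _ _ _ (by simpa using Nat.lt_of_succ_lt_succ h)]
        simp [mySplit, hc]

lemma splitOn_eq (cs : List Char) : PySem.Chars.splitOn cs ['.'] = mySplit cs [] := by
  unfold PySem.Chars.splitOn
  rw [go_eq (cs.length + 1) cs [] [] (by omega)]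
  simp

lemma mySplit_ne_nil : ∀ (l cur : List Char), mySplit l cur ≠ [] := by
  intro l
  induction l with
  | nil => intro cur; simp [mySplit]
  | cons c rest ih =>
    intro cur
    by_cases hc : c = '.' <;> simp [mySplit, hc] <;> exact ih _

lemma mySplit_dotfree : ∀ (l cur : List Char), '.' ∉ cur → ∀ p ∈ mySplit l cur, '.' ∉ p := by
  intro l
  induction l with
  | nil => intro cur hcur p hp; simp [mySplit] at hp; subst hp; simpa using hcur
  | cons c rest ih =>
    intro cur hcur p hp
    by_cases hc : c = '.'
    · subst hc
      simp [mySplit] at hp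
      rcases hp with rfl | hp
      · simpa using hcur
      · exact ih [] (by simp) p hp
    · simp [mySplit, hc] at hp
      exact ih (c :: cur) (by
        intro h
        rcases List.mem_cons.mp h with h | h
        · exact hc h.symm
        · exact hcur h) p hp

lemma join_mySplit : ∀ (l cur : List Char),
    PySem.Chars.join ['.'] (mySplit l cur) = cur.reverse ++ l := by
  intro l
  induction l with
  | nil => intro cur; simp [mySplit, PySem.Chars.join_singleton]
  | cons c rest ih =>
    intro cur
    by_cases hc : c = '.'
    · subst hc
      obtain ⟨q, qs, hqqs⟩ : ∃ q qs, mySplit rest [] = q :: qs := by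
        cases h : mySplit rest [] with
        | nil => exact absurd h (mySplit_ne_nil rest [])
        | cons q qs => exact ⟨q, qs, rfl⟩
      have hms : mySplit ('.' :: rest) cur = cur.reverse :: mySplit rest [] := by
        simp [mySplit]
      rw [hms, hqqs, PySem.Chars.join_cons_cons, ← hqqs, ih []]
      simp
    · simp only [mySplit, if_neg hc]
      rw [ih (c :: cur)]
      simp

-- m "matches" t: m is t itself or a prefix of t cut at a dot
def Mp (t m : List Char) : Prop := m = t ∨ (m ++ ['.']) <+: t

lemma PREF : ∀ (p : List Char), '.' ∉ p → ∀ (t m : List Char),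
    Mp (p ++ '.' :: t) m ↔ (m = p ∨ ∃ m', m = p ++ '.' :: m' ∧ Mp t m') := by
  intro p
  induction p with
  | nil =>
    intro _ t m
    constructor
    · rintro (rfl | hpre)
      · exact Or.inr ⟨t, rfl, Or.inl rfl⟩
      · cases m with
        | nil => exact Or.inl rfl
        | cons d ms =>
          rw [List.nil_append, List.cons_append] at hpre
          rcases List.cons_prefix_cons.mp hpre with ⟨rfl, h2⟩
          exact Or.inr ⟨ms, rfl, Or.inr h2⟩
    · rintro (rfl | ⟨m', rfl, (rfl | hp)⟩)
      · exact Or.inr ⟨t, by simp⟩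
      · exact Or.inl rfl
      · exact Or.inr (by
          rw [List.nil_append, List.cons_append]
          exact List.cons_prefix_cons.mpr ⟨rfl, hp⟩)
  | cons c p' ih =>
    intro hdf t m
    have hc : c ≠ '.' := fun h => hdf (by rw [h]; exact List.mem_cons_self)
    have hdf' : '.' ∉ p' := fun h => hdf (List.mem_cons_of_mem _ h)
    cases m with
    | nil =>
      constructor
      · rintro (h | h)
        · simp at h
        · rw [List.nil_append, List.cons_append] at h
          rcases List.cons_prefix_cons.mp h with ⟨h1, -⟩
          exact absurd h1.symm hc
      · rintro (h | ⟨m', h, -⟩) <;> simp at h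
    | cons d ms =>
      have hstep : ((c :: p') ++ '.' :: t) = c :: (p' ++ '.' :: t) := rfl
      constructor
      · rintro (h | h)
        · -- m is the whole string
          rw [hstep] at h
          injection h with h1 h2
          subst h1; subst h2
          exact Or.inr ⟨t, rfl, Or.inl rfl⟩
        · rw [hstep, List.cons_append] at h
          rcases List.cons_prefix_cons.mp h with ⟨rfl, h2⟩
          rcases (ih hdf' t ms).mp (Or.inr h2) with h3 | ⟨m', rfl, hm'⟩
          · subst h3; exact Or.inl rfl
          · exact Or.inr ⟨m', rfl, hm'⟩
      · rintro (h | ⟨m', h, hm'⟩)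
        · injection h with h1 h2
          subst h1; subst h2
          refine Or.inr ?_
          rw [hstep, List.cons_append]
          exact List.cons_prefix_cons.mpr ⟨rfl, ⟨t, by simp⟩⟩
        · rw [show (c :: p') ++ '.' :: m' = c :: (p' ++ '.' :: m') from rfl] at h
          injection h with h1 h2
          subst h1; subst h2
          rcases (ih hdf' t (p' ++ '.' :: m')).mpr (Or.inr ⟨m', rfl, hm'⟩) with h3 | h4
          · rw [hstep, h3]; exact Or.inl rfl
          · refine Or.inr ?_
            rw [hstep, List.cons_append]
            exact List.cons_prefix_cons.mpr ⟨rfl, h4⟩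

lemma MATCH : ∀ (ps : List (List Char)) (p : List Char), '.' ∉ p → (∀ q ∈ ps, '.' ∉ q) →
    ∀ m, Mp (PySem.Chars.join ['.'] (p :: ps)) m ↔
      ∃ k, 1 ≤ k ∧ k ≤ ps.length + 1 ∧ m = PySem.Chars.join ['.'] ((p :: ps).take k) := by
  intro ps
  induction ps with
  | nil =>
    intro p hp _ m
    rw [PySem.Chars.join_singleton]
    constructor
    · rintro (rfl | hpre)
      · exact ⟨1, by omega, by simp, by simp [PySem.Chars.join_singleton]⟩
      · exact absurd (hpre.subset (List.mem_append_right m List.mem_cons_self)) hp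
    · rintro ⟨k, hk1, hk2, rfl⟩
      have hk : k = 1 := by simp at hk2; omega
      subst hk
      exact Or.inl (by simp [PySem.Chars.join_singleton])
  | cons q qs ih =>
    intro p hp hqs m
    have hq : '.' ∉ q := hqs q List.mem_cons_self
    have hqs' : ∀ r ∈ qs, '.' ∉ r := fun r hr => hqs r (List.mem_cons_of_mem _ hr)
    have hjoin : PySem.Chars.join ['.'] (p :: q :: qs) =
        p ++ '.' :: PySem.Chars.join ['.'] (q :: qs) := by
      rw [PySem.Chars.join_cons_cons]; simp
    rw [hjoin, PREF p hp]
    constructor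
    · rintro (rfl | ⟨m', rfl, hm'⟩)
      · exact ⟨1, by omega, by simp, by simp [PySem.Chars.join_singleton]⟩
      · rcases (ih q hq hqs' m').mp hm' with ⟨k, hk1, hk2, rfl⟩
        refine ⟨k + 1, by omega, by simp; omega, ?_⟩
        obtain ⟨k', rfl⟩ : ∃ k', k = k' + 1 := ⟨k - 1, by omega⟩
        rw [show (p :: q :: qs).take (k' + 1 + 1) = p :: q :: qs.take k' from rfl,
            show (q :: qs).take (k' + 1) = q :: qs.take k' from rfl,
            PySem.Chars.join_cons_cons]
        simp
    · rintro ⟨k, hk1, hk2, rfl⟩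
      obtain ⟨k', rfl⟩ : ∃ k', k = k' + 1 := ⟨k - 1, by omega⟩
      cases k' with
      | zero => exact Or.inl (by simp [PySem.Chars.join_singleton])
      | succ k'' =>
        refine Or.inr ⟨PySem.Chars.join ['.'] ((q :: qs).take (k'' + 1)), ?_,
          (ih q hq hqs' _).mpr ⟨k'' + 1, by omega, by simp at hk2 ⊢; omega, rfl⟩⟩
        rw [show (p :: q :: qs).take (k'' + 1 + 1) = p :: q :: qs.take k'' from rfl,
            show (q :: qs).take (k'' + 1) = q :: qs.take k'' from rfl,
            PySem.Chars.join_cons_cons]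
        simp

lemma join_cons_ne (x : List Char) (L : List (List Char)) (h : L ≠ []) :
    PySem.Chars.join ['.'] (x :: L) = x ++ '.' :: PySem.Chars.join ['.'] L := by
  cases L with
  | nil => exact absurd rfl h
  | cons y ys => rw [PySem.Chars.join_cons_cons]; simp

lemma join_take_succ : ∀ (j : Nat) (P : List (List Char)) (hj : 1 ≤ j) (h : j < P.length),
    PySem.Chars.join ['.'] (P.take (j + 1)) =
      PySem.Chars.join ['.'] (P.take j) ++ '.' :: P[j] := by
  intro j
  induction j with
  | zero => intro P hj _; omega
  | succ j0 ih =>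
    intro P _ h
    by_cases hj0 : j0 = 0
    · subst hj0
      match P, h with
      | a :: b :: rest, _ =>
        rw [show (a :: b :: rest).take 2 = [a, b] from rfl,
            show (a :: b :: rest).take 1 = [a] from rfl,
            PySem.Chars.join_cons_cons, PySem.Chars.join_singleton,
            PySem.Chars.join_singleton]
        simp
    · have hj1 : 1 ≤ j0 := by omega
      match P, h with
      | a :: P', h =>
        have h' : j0 < P'.length := by simp at h; omega
        have hne : P' ≠ [] := by intro hh; rw [hh] at h'; simp at h'
        have ht1 : P'.take (j0 + 1) ≠ [] := by
          simp [List.take_eq_nil_iff]; exact hne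
        have ht0 : P'.take j0 ≠ [] := by
          simp [List.take_eq_nil_iff]; exact ⟨hj0, hne⟩
        rw [show (a :: P').take (j0 + 1 + 1) = a :: P'.take (j0 + 1) from rfl,
            show (a :: P').take (j0 + 1) = a :: P'.take j0 from rfl,
            join_cons_ne a _ ht1, join_cons_ne a _ ht0, ih P' hj1 h']
        simp

lemma join_take_len_lt : ∀ (P : List (List Char)) (j k : Nat), 1 ≤ j → j < k → k ≤ P.length →
    (PySem.Chars.join ['.'] (P.take j)).length < (PySem.Chars.join ['.'] (P.take k)).length := by
  intro P j k hj hjk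
  induction k with
  | zero => omega
  | succ k0 ih =>
    intro hk
    rcases Nat.lt_succ_iff_lt_or_eq.mp hjk with h | h
    · have h1 := ih h (by omega)
      have h2 : (PySem.Chars.join ['.'] (P.take k0)).length <
          (PySem.Chars.join ['.'] (P.take (k0 + 1))).length := by
        rw [join_take_succ k0 P (by omega) (by omega)]
        simp
      omega
    · subst h
      rw [join_take_succ j P hj (by omega)]
      simp

-- the k-th candidate string, as both ports build it
def candS (P : List (List Char)) (k : Nat) : String :=
  PySem.Str.join "." ((P.map String.ofList).take k)

lemma toList_candS (P : List (List Char)) (k : Nat) :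
    (candS P k).toList = PySem.Chars.join ['.'] (P.take k) := by
  unfold candS PySem.Str.join
  rw [String.toList_ofList]
  have hsep : (".":String).toList = ['.'] := rfl
  rw [hsep, ← List.map_take, List.map_map]
  congr 1
  simp [Function.comp_def, String.toList_ofList]

lemma pyRange_down (n : Nat) :
    PySem.List.pyRange (n : Int) 0 (-1) = ((List.range' 1 n).reverse).map Int.ofNat := by
  rcases Nat.eq_zero_or_pos n with rfl | hn
  · simp [PySem.List.pyRange]
  · have h0 : (0:Int) < (n:Int) := by exact_mod_cast hn
    unfold PySem.List.pyRange
    norm_num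
    rw [if_pos hn, ← List.map_reverse]
    apply List.ext_getElem
    · simp
    · intro i h1 h2
      simp only [List.getElem_map, List.getElem_range, List.getElem_reverse,
        List.getElem_range', List.length_reverse, List.length_range'] at *
      simp only [List.length_map, List.length_range] at h1
      simp only [Int.ofNat_eq_natCast]
      omega

lemma aPrefixLoop_map (mods parts : List String) : ∀ (ks : List Nat),
    aPrefixLoop mods parts (ks.map Int.ofNat) =
      (ks.find? (fun k => mods.contains (PySem.Str.join "." (parts.take k)))).map
        (fun k => PySem.Str.join "." (parts.take k)) := by
  intro ks
  induction ks with
  | nil => simp [aPrefixLoop]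
  | cons k ks ih =>
    rw [List.map_cons]
    simp only [aPrefixLoop]
    rw [PySem.List.slice_to parts (by rw [Int.ofNat_eq_natCast]; exact Int.natCast_nonneg k),
        show (Int.ofNat k).toNat = k from rfl]
    rw [List.find?_cons]
    by_cases h : mods.contains (PySem.Str.join "." (parts.take k)) = true
    · rw [h]
      rfl
    · have hf : mods.contains (PySem.Str.join "." (parts.take k)) = false := by
        simpa using h
      rw [hf]
      exact ih

lemma find?_desc (c : Nat → Bool) : ∀ (n : Nat),
    (match ((List.range' 1 n).reverse).find? c with
     | some k => c k = true ∧ 1 ≤ k ∧ k ≤ n ∧ ∀ j, k < j → j ≤ n → c j = false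
     | none => ∀ j, 1 ≤ j → j ≤ n → c j = false) := by
  intro n
  induction n with
  | zero =>
    simp only [List.range'_zero, List.reverse_nil, List.find?_nil]
    intro j h1 h2
    omega
  | succ n ih =>
    have hsplit : (List.range' 1 (n + 1)).reverse = (n + 1) :: (List.range' 1 n).reverse := by
      rw [List.range'_concat]
      simp [Nat.add_comm]
    rw [hsplit, List.find?_cons]
    by_cases hc1 : c (n + 1) = true
    · rw [hc1]
      exact ⟨hc1, by omega, by omega, fun j h1 h2 => by omega⟩
    · have hf : c (n + 1) = false := by simpa using hc1
      rw [hf]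
      cases h : ((List.range' 1 n).reverse).find? c with
      | none =>
        rw [h] at ih
        intro j hj1 hj2
        rcases Nat.lt_succ_iff_lt_or_eq.mp (by omega : j < n + 2) with hj | hj
        · exact ih j hj1 (by omega)
        · subst hj
          exact Bool.eq_false_iff.mpr hc1
      | some k =>
        rw [h] at ih
        obtain ⟨h1, h2, h3, h4⟩ := ih
        refine ⟨h1, h2, by omega, fun j hj1 hj2 => ?_⟩
        rcases Nat.lt_succ_iff_lt_or_eq.mp (by omega : j < n + 2) with hj | hj
        · exact h4 j hj1 (by omega)
        · subst hj
          exact Bool.eq_false_iff.mpr hc1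

-- B's loop invariant
lemma bBestLoop_spec (qn : String) : ∀ (l : List String) (best : Option String),
    (∀ b, best = some b →
      (b == qn || PySem.Chars.startswith qn.toList (b.toList ++ ['.'])) = true) →
    (match bBestLoop qn l best with
     | none => best = none ∧ ∀ m ∈ l,
         (m == qn || PySem.Chars.startswith qn.toList (m.toList ++ ['.'])) = false
     | some r =>
         (r == qn || PySem.Chars.startswith qn.toList (r.toList ++ ['.'])) = true ∧
         (r ∈ l ∨ best = some r) ∧
         (∀ m ∈ l, (m == qn || PySem.Chars.startswith qn.toList (m.toList ++ ['.'])) = true →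
            PySem.Str.len m ≤ PySem.Str.len r) ∧
         (∀ b, best = some b → PySem.Str.len b ≤ PySem.Str.len r)) := by
  intro l
  induction l with
  | nil =>
    intro best hb
    simp only [bBestLoop]
    cases best with
    | none => exact ⟨rfl, by simp⟩
    | some b =>
      exact ⟨hb b rfl, Or.inr rfl, by simp,
        fun b' hb' => by injection hb' with h; subst h; exact le_refl _⟩
  | cons m rest ih =>
    intro best hb
    simp only [bBestLoop]
    cases best with
    | none =>
      by_cases hA : (m == qn || PySem.Chars.startswith qn.toList (m.toList ++ ['.'])) = true
      · rw [hA]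
        have hmono : ∀ b, (some m : Option String) = some b →
            (b == qn || PySem.Chars.startswith qn.toList (b.toList ++ ['.'])) = true :=
          fun b hb' => by injection hb' with h; subst h; exact hA
        have hrec := ih (some m) hmono
        cases hres : bBestLoop qn rest (some m) with
        | none => rw [hres] at hrec; exact absurd hrec.1 (by simp)
        | some r =>
          rw [hres] at hrec
          obtain ⟨h1, h2, h3, h4⟩ := hrec
          refine ⟨h1, ?_, ?_, fun b hb' => nomatch hb'⟩
          · rcases h2 with h | h
            · exact Or.inl (List.mem_cons_of_mem _ h)
            · injection h with h; subst h; exact Or.inl List.mem_cons_self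
          · intro m' hm' hmatch
            rcases List.mem_cons.mp hm' with rfl | hm'
            · exact h4 _ rfl
            · exact h3 m' hm' hmatch
      · have hf : (m == qn || PySem.Chars.startswith qn.toList (m.toList ++ ['.'])) = false := by
          simpa using hA
        rw [hf]
        have hrec := ih none hb
        cases hres : bBestLoop qn rest none with
        | none =>
          rw [hres] at hrec
          refine ⟨rfl, ?_⟩
          intro m' hm'
          rcases List.mem_cons.mp hm' with rfl | hm'
          · exact hf
          · exact hrec.2 m' hm'
        | some r =>
          rw [hres] at hrec
          obtain ⟨h1, h2, h3, h4⟩ := hrec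
          refine ⟨h1, ?_, ?_, h4⟩
          · rcases h2 with h | h
            · exact Or.inl (List.mem_cons_of_mem _ h)
            · exact nomatch h
          · intro m' hm' hmatch
            rcases List.mem_cons.mp hm' with rfl | hm'
            · exact absurd hmatch (by simp [hf])
            · exact h3 m' hm' hmatch
    | some b =>
      have hbB := hb b rfl
      by_cases hA : (m == qn || PySem.Chars.startswith qn.toList (m.toList ++ ['.'])) = true
      · by_cases hlt : PySem.Str.len b < PySem.Str.len m
        · have hc : ((m == qn || PySem.Chars.startswith qn.toList (m.toList ++ ['.'])) &&
              (match (some b : Option String) with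
               | none => true
               | some b => PySem.Str.len m > PySem.Str.len b)) = true := by
            simp [hA]
            simpa using hlt
          rw [hc]
          have hmono : ∀ b', (some m : Option String) = some b' →
              (b' == qn || PySem.Chars.startswith qn.toList (b'.toList ++ ['.'])) = true :=
            fun b' hb' => by injection hb' with h; subst h; exact hA
          have hrec := ih (some m) hmono
          cases hres : bBestLoop qn rest (some m) with
          | none => rw [hres] at hrec; exact absurd hrec.1 (by simp)
          | some r =>
            rw [hres] at hrec
            obtain ⟨h1, h2, h3, h4⟩ := hrec
            refine ⟨h1, ?_, ?_, ?_⟩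
            · rcases h2 with h | h
              · exact Or.inl (List.mem_cons_of_mem _ h)
              · injection h with h; subst h; exact Or.inl List.mem_cons_self
            · intro m' hm' hmatch
              rcases List.mem_cons.mp hm' with rfl | hm'
              · exact h4 _ rfl
              · exact h3 m' hm' hmatch
            · intro b' hb'
              injection hb' with h; subst h
              exact le_trans (le_of_lt hlt) (h4 m rfl)
        · have hc : ((m == qn || PySem.Chars.startswith qn.toList (m.toList ++ ['.'])) &&
              (match (some b : Option String) with
               | none => true
               | some b => PySem.Str.len m > PySem.Str.len b)) = false := by
            simp
            intro _
            simpa using hlt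
          rw [hc]
          have hrec := ih (some b) hb
          cases hres : bBestLoop qn rest (some b) with
          | none => rw [hres] at hrec; exact absurd hrec.1 (by simp)
          | some r =>
            rw [hres] at hrec
            obtain ⟨h1, h2, h3, h4⟩ := hrec
            refine ⟨h1, ?_, ?_, h4⟩
            · rcases h2 with h | h
              · exact Or.inl (List.mem_cons_of_mem _ h)
              · exact Or.inr h
            · intro m' hm' hmatch
              rcases List.mem_cons.mp hm' with rfl | hm'
              · exact le_trans (not_lt.mp hlt) (h4 b rfl)
              · exact h3 m' hm' hmatch
      · have hf : (m == qn || PySem.Chars.startswith qn.toList (m.toList ++ ['.'])) = false := by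
          simpa using hA
        have hc : ((m == qn || PySem.Chars.startswith qn.toList (m.toList ++ ['.'])) &&
            (match (some b : Option String) with
             | none => true
             | some b => PySem.Str.len m > PySem.Str.len b)) = false := by
          simp [hf]
        rw [hc]
        have hrec := ih (some b) hb
        cases hres : bBestLoop qn rest (some b) with
        | none => rw [hres] at hrec; exact absurd hrec.1 (by simp)
        | some r =>
          rw [hres] at hrec
          obtain ⟨h1, h2, h3, h4⟩ := hrec
          refine ⟨h1, ?_, ?_, h4⟩
          · rcases h2 with h | h
            · exact Or.inl (List.mem_cons_of_mem _ h)
            · exact Or.inr h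
          · intro m' hm' hmatch
            rcases List.mem_cons.mp hm' with rfl | hm'
            · exact absurd hmatch (by simp [hf])
            · exact h3 m' hm' hmatch

-- ===== VERDICT (by name: the statement is the Claim_ definition above) =====
theorem module_id_for_spec : Claim_equal_module_id_for := by
  intro qn mods _
  unfold Spec_module_id_for
  by_cases hq : qn = ""
  · subst hq
    simp [module_id_for, module_id_for_alt]
  · have hqf : (qn == "") = false := by simp [hq]
    have hinj : ∀ s t : String, s.toList = t.toList → s = t := fun s t h => by
      have := congrArg String.ofList h
      simpa [String.ofList_toList] using this
    have hsplit : PySem.Str.split? qn "." = some ((mySplit qn.toList []).map String.ofList) := by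
      unfold PySem.Str.split? PySem.Chars.split?
      rw [show ((".":String).toList) = ['.'] from rfl]
      simp [splitOn_eq]
    simp only [module_id_for, module_id_for_alt, hqf, Bool.false_eq_true, if_false,
      hsplit, Option.getD_some]
    set P := mySplit qn.toList [] with hPdef
    obtain ⟨p0, Ptl, hPeq⟩ : ∃ p0 Ptl, P = p0 :: Ptl := by
      cases h : P with
      | nil => exact absurd h (mySplit_ne_nil qn.toList [])
      | cons p0 Ptl => exact ⟨p0, Ptl, rfl⟩
    have hn1 : 1 ≤ P.length := by rw [hPeq]; simp
    have hdf : ∀ p ∈ P, '.' ∉ p := mySplit_dotfree qn.toList [] (by simp)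
    have hjoin : PySem.Chars.join ['.'] P = qn.toList := by
      simpa using join_mySplit qn.toList []
    have hcandn : candS P P.length = qn := by
      apply hinj
      rw [toList_candS, List.take_length, hjoin]
    have hisM : ∀ m : String,
        ((m == qn || PySem.Chars.startswith qn.toList (m.toList ++ ['.'])) = true)
        ↔ ∃ k, 1 ≤ k ∧ k ≤ P.length ∧ m = candS P k := by
      intro m
      have hmatch := MATCH Ptl p0 (hdf p0 (by rw [hPeq]; exact List.mem_cons_self))
        (fun q hq' => hdf q (by rw [hPeq]; exact List.mem_cons_of_mem _ hq')) m.toList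
      rw [← hPeq] at hmatch
      rw [hjoin] at hmatch
      have hlhs : ((m == qn || PySem.Chars.startswith qn.toList (m.toList ++ ['.'])) = true)
          ↔ Mp qn.toList m.toList := by
        rw [Bool.or_eq_true, beq_iff_eq, PySem.Chars.startswith_iff]
        unfold Mp
        constructor
        · rintro (rfl | h)
          · exact Or.inl rfl
          · exact Or.inr h
        · rintro (h | h)
          · exact Or.inl (hinj m qn h)
          · exact Or.inr h
      rw [hlhs, hmatch]
      have hlen : Ptl.length + 1 = P.length := by rw [hPeq]; simp
      constructor
      · rintro ⟨k, h1, h2, h3⟩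
        exact ⟨k, h1, by omega, hinj _ _ (by rw [toList_candS]; exact h3)⟩
      · rintro ⟨k, h1, h2, rfl⟩
        exact ⟨k, h1, by omega, by rw [toList_candS]⟩
    have hlt : ∀ j k, 1 ≤ j → j < k → k ≤ P.length →
        PySem.Str.len (candS P j) < PySem.Str.len (candS P k) := by
      intro j k h1 h2 h3
      have h := join_take_len_lt P j k h1 h2 h3
      unfold PySem.Str.len
      rw [toList_candS, toList_candS]
      exact_mod_cast h
    -- A's range and loop in terms of find?
    have hplen : ((P.map String.ofList).length : Int) - 1 = ((P.length - 1 : Nat) : Int) := by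
      rw [List.length_map]
      omega
    rw [hplen, show ((P.length - 1 : Nat) : Int) = ((P.length - 1 : Nat) : Int) from rfl,
      pyRange_down (P.length - 1), aPrefixLoop_map]
    -- B's loop
    have hB := bBestLoop_spec qn mods none (fun b hb => nomatch hb)
    cases hres : bBestLoop qn mods none with
    | none =>
      rw [hres] at hB
      obtain ⟨-, hnone⟩ := hB
      have hcf : ∀ k, 1 ≤ k → k ≤ P.length → mods.contains (candS P k) = false := by
        intro k h1 h2
        by_contra h
        have h' : mods.contains (candS P k) = true := by simpa using h
        have hmem : candS P k ∈ mods := List.contains_iff_mem.mp h'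
        have hfalse := hnone _ hmem
        have htrue := (hisM (candS P k)).mpr ⟨k, h1, h2, rfl⟩
        rw [htrue] at hfalse
        exact Bool.true_eq_false.mp hfalse
      have hcq : mods.contains qn = false := by
        rw [← hcandn]
        exact hcf P.length hn1 le_rfl
      rw [hcq]
      simp only [Bool.false_eq_true, if_false]
      have hfind : (List.find? (fun k => mods.contains (PySem.Str.join "."
          ((P.map String.ofList).take k))) ((List.range' 1 (P.length - 1)).reverse)) = none := by
        rw [List.find?_eq_none]
        intro x hx
        rw [List.mem_reverse, List.mem_range'_1] at hx
        have := hcf x hx.1 (by omega)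
        simp [candS] at this
        simp [this]
      rw [hfind]
      rfl
    | some r =>
      rw [hres] at hB
      obtain ⟨h1, h2, h3, -⟩ := hB
      obtain ⟨kB, hkB1, hkBn, rfl⟩ := (hisM r).mp h1
      have hmemr : candS P kB ∈ mods := by
        rcases h2 with h | h
        · exact h
        · exact nomatch h
      have hckB : mods.contains (candS P kB) = true := List.contains_iff_mem.mpr hmemr
      by_cases hcn : mods.contains qn = true
      · rw [if_pos hcn]
        -- the top candidate qn matches; maximality of r forces kB = P.length
        have hcn' : candS P P.length ∈ mods := by
          rw [hcandn]
          exact List.contains_iff_mem.mp hcn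
        have hmax := h3 _ hcn' ((hisM _).mpr ⟨P.length, hn1, le_rfl, rfl⟩)
        have hkBeq : kB = P.length := by
          by_contra hne
          have hklt : kB < P.length := by omega
          have := hlt kB P.length hkB1 hklt le_rfl
          omega
        rw [hkBeq, hcandn]
      · have hcnf : mods.contains qn = false := by simpa using hcn
        rw [hcnf]
        simp only [Bool.false_eq_true, if_false]
        have hkBn' : kB ≤ P.length - 1 := by
          by_contra hk
          have : kB = P.length := by omega
          subst this
          rw [← hcandn] at hcnf
          rw [hckB] at hcnf
          exact Bool.true_eq_false.mp hcnf
        have hdesc := find?_desc (fun k => mods.contains (candS P k)) (P.length - 1)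
        cases hfind : (List.find? (fun k => mods.contains (candS P k))
            ((List.range' 1 (P.length - 1)).reverse)) with
        | none =>
          rw [hfind] at hdesc
          have := hdesc kB hkB1 hkBn'
          rw [hckB] at this
          exact absurd this (by simp)
        | some kA =>
          rw [hfind] at hdesc
          obtain ⟨hckA, hkA1, hkAn, hmaxA⟩ := hdesc
          have hkAB : kA = kB := by
            by_contra hne
            rcases Nat.lt_or_ge kA kB with h | h
            · have := hmaxA kB h hkBn'
              rw [hckB] at this
              exact absurd this (by simp)
            · have hklt : kB < kA := by omega
              have hmemA : candS P kA ∈ mods := List.contains_iff_mem.mp hckA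
              have hle := h3 _ hmemA ((hisM _).mpr ⟨kA, hkA1, by omega, rfl⟩)
              have := hlt kB kA hkB1 hklt (by omega)
              omega
          have hfind' : (List.find? (fun k => mods.contains (PySem.Str.join "."
              ((P.map String.ofList).take k))) ((List.range' 1 (P.length - 1)).reverse))
              = some kA := by
            rw [← hfind]
            rfl
          rw [hfind']
          simp only [Option.map_some]
          rw [hkAB]
          rfl
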